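-- pv_equiv track=rewrite | github.com/SAIBALKUMAR/leetcode | 939-minimum-area-rectangle/939-minimum-area-rectangle.py | minAreaRect
-- ===== SOURCE A (Python) =====
-- def minAreaRect(points):
--     """
--     :type points: List[List[int]]
--     :rtype: int
--     """
--     length = len(points)
--
--     if length < 4:
--         return 0
--
--     minimumArea = float("inf")
--
--     hashSet = {}
--
--     for x1, y1 in points:
--         for x2, y2 in hashSet:
--             if ((x2, y1) in hashSet and (x1, y2) in hashSet):
--                 area = abs(y2-y1)*abs(x2-x1)
--
--                 if area and  area < minimumArea:
--                     minimumArea = area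
--         hashSet[(x1,y1)]= (x1, y1)
--
--     return minimumArea if minimumArea != float('inf') else 0
-- ===== SOURCE B (Python) =====
-- def _pairs(ys):
--     if not ys:
--         return []
--     return [(ys[0], y2) for y2 in ys[1:]] + _pairs(ys[1:])
--
--
-- def minAreaRect(points):
--     if len(points) < 4:
--         return 0
--     cols = {}
--     for x, y in points:
--         cols.setdefault(x, set()).add(y)
--     best = None
--     last = {}
--     for x in sorted(cols):
--         ys = sorted(cols[x])
--         for (y1, y2) in _pairs(ys):
--             if (y1, y2) in last:
--                 area = (x - last[(y1, y2)]) * (y2 - y1)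
--                 if best is None or area < best:
--                     best = area
--             last[(y1, y2)] = x
--     return 0 if best is None else best
-- ===== Notes on version B (the rewrite author's own statement) =====
-- stated objective: alternative
-- what changed: A pairs every point with every previously seen point and tests the two opposite corners for membership; B groups the points into columns keyed by x, walks the columns in ascending x order and, for each y-pair inside a column, looks up in a dict the last column that contained the same y-pair, so only pairs sharing a column are ever combined.
import Mathlib
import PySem

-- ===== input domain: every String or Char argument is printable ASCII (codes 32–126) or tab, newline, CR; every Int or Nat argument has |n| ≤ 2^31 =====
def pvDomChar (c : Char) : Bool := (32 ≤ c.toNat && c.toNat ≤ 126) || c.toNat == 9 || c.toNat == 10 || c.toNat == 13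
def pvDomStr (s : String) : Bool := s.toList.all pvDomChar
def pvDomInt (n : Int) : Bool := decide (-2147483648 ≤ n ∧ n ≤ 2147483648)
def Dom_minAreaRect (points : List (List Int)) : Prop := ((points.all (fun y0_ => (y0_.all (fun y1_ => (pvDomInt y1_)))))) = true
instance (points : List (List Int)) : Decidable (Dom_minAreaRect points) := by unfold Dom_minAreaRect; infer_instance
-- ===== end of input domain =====

-- B groups the points into columns keyed by x and scans the columns in ascending x
-- order, remembering per y-pair the last column containing it — a different algorithm
-- from A's pairing of each point with every previously seen point; same return value.

-- ===== PORT A =====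
-- 'minimumArea' is carried as 'Option Int': 'none' is Python's float("inf") sentinel
-- (the only float in A); every arithmetic on it is exact on Int.
def updMinA (m : Option Int) (area : Int) : Option Int :=
  -- Python: 'if area and area < minimumArea: minimumArea = area'
  if (area != 0) && (match m with | none => true | some v => decide (area < v)) then some area else m

def stepA (st : Option Int × PySem.Dict (Int × Int) (Int × Int)) (p : List Int) :
    Option Int × PySem.Dict (Int × Int) (Int × Int) :=
  match p with
  | x1 :: y1 :: _ =>
    -- 'for x2, y2 in hashSet' iterates the dict's keys (insertion order)
    let m := st.2.keys.foldl (fun m q =>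
      if st.2.contains (q.1, y1) && st.2.contains (x1, q.2) then
        updMinA m (|q.2 - y1| * |q.1 - x1|)
      else m) st.1
    (m, st.2.insert (x1, y1) (x1, y1))
  | _ => st  -- unpacking raises in Python; excluded by Pre_

def minAreaRect (points : List (List Int)) : Int :=
  if points.length < 4 then 0
  else
    let st := points.foldl stepA (none, PySem.Dict.empty)
    match st.1 with
    | some m => m
    | none => 0

-- ===== PORT B =====
def pairsB : List Int → List (Int × Int)
  | [] => []
  | y :: t => t.map (fun y2 => (y, y2)) ++ pairsB t

def updMinB (m : Option Int) (area : Int) : Option Int :=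
  -- Python: 'if best is None or area < best: best = area'
  match m with
  | none => some area
  | some b => if area < b then some area else some b

def stepInB (x : Int) (st : Option Int × PySem.Dict (Int × Int) Int) (pr : Int × Int) :
    Option Int × PySem.Dict (Int × Int) Int :=
  let m := match st.2.get? pr with
    | some xp => updMinB st.1 ((x - xp) * (pr.2 - pr.1))
    | none => st.1
  (m, st.2.insert pr x)

-- 'cols.setdefault(x, set()).add(y)': in-place add to the set stored at x; exact as
-- insert of the updated set (setdefault appends a missing key, insert keeps position).
def colsB (points : List (List Int)) : PySem.Dict Int (PySem.Set Int) :=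
  points.foldl (fun d p =>
    match p with
    | x :: y :: _ => d.insert x (PySem.Set.add (d.getD x PySem.Set.empty) y)
    | _ => d) PySem.Dict.empty

-- one column: scan its y-pairs against the last-seen dict
def stepOutB (cols : PySem.Dict Int (PySem.Set Int))
    (st : Option Int × PySem.Dict (Int × Int) Int) (x : Int) :
    Option Int × PySem.Dict (Int × Int) Int :=
  -- 'ys = sorted(cols[x])' — x is always a key, so getD's default is never used
  let ys := PySem.List.sorted (cols.getD x PySem.Set.empty) (fun y => y) false
  (pairsB ys).foldl (stepInB x) st

def minAreaRect_alt (points : List (List Int)) : Int :=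
  if points.length < 4 then 0
  else
  let cols := colsB points
  let st := (PySem.List.sorted cols.keys (fun x => x) false).foldl (stepOutB cols)
    ((none : Option Int), (PySem.Dict.empty : PySem.Dict (Int × Int) Int))
  match st.1 with
  | some b => b
  | none => 0

-- ===== PRECONDITION & SPEC =====
-- Pre_ excludes only inputs on which A raises: with at least four elements,
-- 'for x1, y1 in points' is a ValueError unless every element has exactly two entries
-- (with fewer than four elements A returns 0 before iterating).
def Pre_minAreaRect (points : List (List Int)) : Prop :=
  points.length < 4 ∨ ∀ p ∈ points, p.length = 2
instance (points : List (List Int)) : Decidable (Pre_minAreaRect points) := by unfold Pre_minAreaRect; infer_instance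

def pvWitness_minAreaRect : List (List Int) := [[0, 0], [0, 2], [3, 0], [3, 2]]

def Spec_minAreaRect (points : List (List Int)) (out : Int) : Prop := out = minAreaRect_alt points
instance (points : List (List Int)) (out : Int) : Decidable (Spec_minAreaRect points out) := by unfold Spec_minAreaRect; infer_instance

-- ===== CLAIM (what is proved, stated in full; the proofs are below) =====
def Claim_equal_minAreaRect : Prop := ∀ (points : List (List Int)), Dom_minAreaRect points → Pre_minAreaRect points → Spec_minAreaRect points (minAreaRect points)

-- ===== LEMMAS AND PROOFS =====

-- the distinct-point rectangle spec both programs compute the minimum of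
def Rect (S : Int × Int → Prop) (a : Int) : Prop :=
  ∃ x1 y1 x2 y2, S (x1, y1) ∧ S (x2, y2) ∧ S (x1, y2) ∧ S (x2, y1) ∧
    x1 < x2 ∧ y1 < y2 ∧ a = (x2 - x1) * (y2 - y1)

def IsMinOf (mo : Option Int) (P : Int → Prop) : Prop :=
  (∀ a, P a → ∃ m, mo = some m ∧ m ≤ a) ∧ (∀ m, mo = some m → P m)

lemma IsMinOf_unique {mo mo' : Option Int} {P : Int → Prop}
    (h : IsMinOf mo P) (h' : IsMinOf mo' P) : mo = mo' := by
  obtain ⟨hlb, hm⟩ := h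
  obtain ⟨hlb', hm'⟩ := h'
  cases mo with
  | none =>
    cases mo' with
    | none => rfl
    | some v' =>
      obtain ⟨m, hm1, _⟩ := hlb v' (hm' v' rfl)
      cases hm1
  | some v =>
    cases mo' with
    | none =>
      obtain ⟨m, hm1, _⟩ := hlb' v (hm v rfl)
      cases hm1
    | some v' =>
      obtain ⟨m1, hm1, hle1⟩ := hlb' v (hm v rfl)
      obtain ⟨m2, hm2, hle2⟩ := hlb v' (hm' v' rfl)
      cases hm1; cases hm2
      have : v = v' := le_antisymm hle2 hle1
      simp [this]

lemma IsMinOf_congr {mo : Option Int} {P Q : Int → Prop}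
    (hpq : ∀ a, P a ↔ Q a) (h : IsMinOf mo P) : IsMinOf mo Q := by
  obtain ⟨hlb, hm⟩ := h
  exact ⟨fun a ha => hlb a ((hpq a).mpr ha), fun m hm' => (hpq m).mp (hm m hm')⟩

lemma IsMinOf_between {mo : Option Int} {P Q : Int → Prop}
    (h : IsMinOf mo P) (hPQ : ∀ a, P a → Q a) (hQP : ∀ a, Q a → ∃ b, P b ∧ b ≤ a) :
    IsMinOf mo Q := by
  obtain ⟨hlb, hm⟩ := h
  refine ⟨fun a ha => ?_, fun m hm' => hPQ m (hm m hm')⟩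
  obtain ⟨b, hb, hba⟩ := hQP a ha
  obtain ⟨m, hmo, hmb⟩ := hlb b hb
  exact ⟨m, hmo, le_trans hmb hba⟩

lemma updMinA_min {m : Option Int} {P : Int → Prop} (h : IsMinOf m P) (a : Int) :
    IsMinOf (updMinA m a) (fun b => P b ∨ (b = a ∧ a ≠ 0)) := by
  obtain ⟨hlb, hm⟩ := h
  unfold updMinA
  by_cases ha : a = 0
  · simp only [ha, bne_self_eq_false, Bool.false_and]
    refine ⟨fun b hb => ?_, fun v hv => Or.inl (hm v hv)⟩
    rcases hb with hb | ⟨_, hb0⟩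
    · exact hlb b hb
    · exact absurd rfl hb0
  · cases m with
    | none =>
      simp only [bne_iff_ne, ne_eq, ha, not_false_eq_true, Bool.and_true, if_pos]
      refine ⟨fun b hb => ?_, fun v hv => ?_⟩
      · rcases hb with hb | ⟨hb, _⟩
        · obtain ⟨m, hmo, _⟩ := hlb b hb; cases hmo
        · exact ⟨a, rfl, by omega⟩
      · cases hv; exact Or.inr ⟨rfl, by tauto⟩
    | some v =>
      by_cases hav : a < v
      · simp only [bne_iff_ne, ne_eq, ha, not_false_eq_true, hav, decide_true,
          Bool.and_true, if_pos]
        refine ⟨fun b hb => ?_, fun w hw => ?_⟩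
        · rcases hb with hb | ⟨hb, _⟩
          · obtain ⟨m, hmo, hmb⟩ := hlb b hb
            cases hmo
            exact ⟨a, rfl, le_trans (le_of_lt hav) hmb⟩
          · exact ⟨a, rfl, le_of_eq hb.symm⟩
        · cases hw; exact Or.inr ⟨rfl, by tauto⟩
      · simp only [ne_eq, ha, not_false_eq_true, hav, decide_false, Bool.and_false]
        refine ⟨fun b hb => ?_, fun w hw => Or.inl (hm w hw)⟩
        rcases hb with hb | ⟨hb, _⟩
        · exact hlb b hb
        · exact ⟨v, rfl, by omega⟩

lemma updMinB_min {m : Option Int} {P : Int → Prop} (h : IsMinOf m P) (a : Int) :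
    IsMinOf (updMinB m a) (fun b => P b ∨ b = a) := by
  obtain ⟨hlb, hm⟩ := h
  unfold updMinB
  cases m with
  | none =>
    refine ⟨fun b hb => ?_, fun v hv => ?_⟩
    · rcases hb with hb | hb
      · obtain ⟨m, hmo, _⟩ := hlb b hb; cases hmo
      · exact ⟨a, rfl, le_of_eq hb.symm⟩
    · cases hv; exact Or.inr rfl
  | some v =>
    by_cases hav : a < v
    · simp only [hav, if_pos]
      refine ⟨fun b hb => ?_, fun w hw => ?_⟩
      · rcases hb with hb | hb
        · obtain ⟨m, hmo, hmb⟩ := hlb b hb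
          cases hmo
          exact ⟨a, rfl, le_trans (le_of_lt hav) hmb⟩
        · exact ⟨a, rfl, le_of_eq hb.symm⟩
      · cases hw; exact Or.inr rfl
    · simp only [hav, if_false]
      refine ⟨fun b hb => ?_, fun w hw => Or.inl (hm w hw)⟩
      rcases hb with hb | hb
      · exact hlb b hb
      · exact ⟨v, rfl, by omega⟩

-- A's inner loop: a guarded min-accumulation over a list of candidates
lemma innerA_min (L : List (Int × Int)) (C : Int × Int → Bool) (g : Int × Int → Int) :
    ∀ (m0 : Option Int) (P : Int → Prop), IsMinOf m0 P →
    IsMinOf (L.foldl (fun m q => if C q then updMinA m (g q) else m) m0)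
      (fun a => P a ∨ ∃ q ∈ L, C q = true ∧ g q = a ∧ a ≠ 0) := by
  induction L with
  | nil =>
    intro m0 P h
    simp only [List.foldl_nil]
    exact IsMinOf_congr (by simp) h
  | cons q L ih =>
    intro m0 P h
    simp only [List.foldl_cons]
    have h1 : IsMinOf (if C q then updMinA m0 (g q) else m0)
        (fun b => P b ∨ (C q = true ∧ g q = b ∧ b ≠ 0)) := by
      by_cases hC : C q = true
      · rw [if_pos hC]
        refine IsMinOf_congr (fun b => ?_) (updMinA_min h (g q))
        constructor
        · rintro (hb | ⟨hb, h0⟩)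
          · exact Or.inl hb
          · exact Or.inr ⟨hC, by omega, by omega⟩
        · rintro (hb | ⟨_, hb, h0⟩)
          · exact Or.inl hb
          · exact Or.inr ⟨by omega, by omega⟩
      · rw [if_neg hC]
        refine IsMinOf_congr (fun b => ?_) h
        constructor
        · exact fun hb => Or.inl hb
        · rintro (hb | ⟨hc, _⟩)
          · exact hb
          · exact absurd hc hC
    refine IsMinOf_congr (fun a => ?_) (ih _ _ h1)
    simp only [List.mem_cons]
    constructor
    · rintro ((ha | ⟨hc, hg, h0⟩) | ⟨q', hq', hc, hg, h0⟩)
      · exact Or.inl ha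
      · exact Or.inr ⟨q, Or.inl rfl, hc, hg, h0⟩
      · exact Or.inr ⟨q', Or.inr hq', hc, hg, h0⟩
    · rintro (ha | ⟨q', (rfl | hq'), hc, hg, h0⟩)
      · exact Or.inl (Or.inl ha)
      · exact Or.inl (Or.inr ⟨hc, hg, h0⟩)
      · exact Or.inr ⟨q', hq', hc, hg, h0⟩

-- the membership test of A's inner loop, as a named condition
def st2c (d : PySem.Dict (Int × Int) (Int × Int)) (y1 x1 : Int) (q : Int × Int) : Bool :=
  d.contains (q.1, y1) && d.contains (x1, q.2)

def toPair (p : List Int) : Int × Int :=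
  match p with
  | x :: y :: _ => (x, y)
  | _ => (0, 0)

lemma rect_mono {S S' : Int × Int → Prop} (hss : ∀ q, S q → S' q) {a : Int}
    (h : Rect S a) : Rect S' a := by
  obtain ⟨X1, Y1, X2, Y2, h1, h2, h3, h4, hx, hy, ha⟩ := h
  exact ⟨X1, Y1, X2, Y2, hss _ h1, hss _ h2, hss _ h3, hss _ h4, hx, hy, ha⟩

lemma rect_insert_iff (d : PySem.Dict (Int × Int) (Int × Int)) (x1 y1 a : Int) :
    Rect (fun q => (d.insert (x1, y1) (x1, y1)).contains q = true) a ↔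
      (Rect (fun q => d.contains q = true) a ∨
        ∃ q ∈ d.keys, (st2c d y1 x1 q) = true ∧ |q.2 - y1| * |q.1 - x1| = a ∧ a ≠ 0) := by
  have hmem : ∀ q : Int × Int, (d.insert (x1, y1) (x1, y1)).contains q = true ↔
      (q = (x1, y1) ∨ d.contains q = true) := by
    intro q
    rw [PySem.Dict.contains_insert]
    simp [beq_iff_eq]
  constructor
  · rintro ⟨X1, Y1, X2, Y2, h1, h2, h3, h4, hx, hy, ha⟩
    have hpos : 0 < a := by rw [ha]; exact mul_pos (by omega) (by omega)
    rw [hmem] at h1 h2 h3 h4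
    by_cases hc : d.contains (x1, y1) = true
    · left
      refine ⟨X1, Y1, X2, Y2, ?_, ?_, ?_, ?_, hx, hy, ha⟩ <;>
        [rcases h1 with h | h; rcases h2 with h | h; rcases h3 with h | h;
         rcases h4 with h | h] <;> first | (rw [h]; exact hc) | exact h
    · rcases h1 with h1 | h1
      · -- the new point is the lower-left corner; partner q = (X2, Y2)
        obtain ⟨rfl, rfl⟩ := Prod.mk.inj h1
        have h2' : d.contains (X2, Y2) = true := by
          rcases h2 with h | h
          · exact absurd (Prod.mk.inj h).1 (by omega)
          · exact h
        have h3' : d.contains (X1, Y2) = true := by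
          rcases h3 with h | h
          · exact absurd (Prod.mk.inj h).2 (by omega)
          · exact h
        have h4' : d.contains (X2, Y1) = true := by
          rcases h4 with h | h
          · exact absurd (Prod.mk.inj h).1 (by omega)
          · exact h
        refine Or.inr ⟨(X2, Y2), (PySem.Dict.contains_iff_mem_keys _ _).mp h2', ?_, ?_, by omega⟩
        · unfold st2c; simp only [Bool.and_eq_true]; exact ⟨h4', h3'⟩
        · rw [abs_of_pos (by omega : (0:Int) < Y2 - Y1)] at *
          rw [abs_of_pos (by omega : (0:Int) < X2 - X1)]
          rw [ha]; ring
      rcases h2 with h2 | h2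
      · -- the new point is the upper-right corner; partner q = (X1, Y1)
        obtain ⟨rfl, rfl⟩ := Prod.mk.inj h2
        have h3' : d.contains (X1, Y2) = true := by
          rcases h3 with h | h
          · exact absurd (Prod.mk.inj h).1 (by omega)
          · exact h
        have h4' : d.contains (X2, Y1) = true := by
          rcases h4 with h | h
          · exact absurd (Prod.mk.inj h).2 (by omega)
          · exact h
        refine Or.inr ⟨(X1, Y1), (PySem.Dict.contains_iff_mem_keys _ _).mp h1, ?_, ?_, by omega⟩
        · unfold st2c; simp only [Bool.and_eq_true]; exact ⟨h3', h4'⟩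
        · rw [abs_of_neg (by omega : Y1 - Y2 < (0:Int)),
              abs_of_neg (by omega : X1 - X2 < (0:Int)), ha]; ring
      rcases h3 with h3 | h3
      · -- the new point is the upper-left corner; partner q = (X2, Y1)
        obtain ⟨rfl, rfl⟩ := Prod.mk.inj h3
        have h4' : d.contains (X2, Y1) = true := by
          rcases h4 with h | h
          · exact absurd (Prod.mk.inj h).1 (by omega)
          · exact h
        refine Or.inr ⟨(X2, Y1), (PySem.Dict.contains_iff_mem_keys _ _).mp h4', ?_, ?_, by omega⟩
        · unfold st2c; simp only [Bool.and_eq_true]; exact ⟨h2, h1⟩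
        · rw [abs_of_neg (by omega : Y1 - Y2 < (0:Int)),
              abs_of_pos (by omega : (0:Int) < X2 - X1), ha]; ring
      rcases h4 with h4 | h4
      · -- the new point is the lower-right corner; partner q = (X1, Y2)
        obtain ⟨rfl, rfl⟩ := Prod.mk.inj h4
        refine Or.inr ⟨(X1, Y2), (PySem.Dict.contains_iff_mem_keys _ _).mp h3, ?_, ?_, by omega⟩
        · unfold st2c; simp only [Bool.and_eq_true]; exact ⟨h1, h2⟩
        · rw [abs_of_pos (by omega : (0:Int) < Y2 - Y1),
              abs_of_neg (by omega : X1 - X2 < (0:Int)), ha]; ring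
      · exact Or.inl ⟨X1, Y1, X2, Y2, h1, h2, h3, h4, hx, hy, ha⟩
  · rintro (hrect | ⟨q, hqk, hC, hg, ha0⟩)
    · exact rect_mono (fun q hq => (hmem q).mpr (Or.inr hq)) hrect
    · have hqc : d.contains q = true := (PySem.Dict.contains_iff_mem_keys _ _).mpr hqk
      unfold st2c at hC
      rw [Bool.and_eq_true] at hC
      obtain ⟨c1, c2⟩ := hC
      have hy2 : q.2 ≠ y1 := by
        intro h; rw [h] at hg; simp at hg; omega
      have hx2 : q.1 ≠ x1 := by
        intro h; rw [h] at hg; simp at hg; omega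
      have hself : (d.insert (x1, y1) (x1, y1)).contains (x1, y1) = true := by
        rw [hmem]; exact Or.inl rfl
      have hup : ∀ r : Int × Int, d.contains r = true →
          (d.insert (x1, y1) (x1, y1)).contains r = true := by
        intro r hr; rw [hmem]; exact Or.inr hr
      rcases lt_or_gt_of_ne hx2 with hxlt | hxlt <;> rcases lt_or_gt_of_ne hy2 with hylt | hylt
      · -- q.1 < x1, q.2 < y1 : q is lower-left, current point upper-right
        refine ⟨q.1, q.2, x1, y1, hup _ hqc, hself, hup _ c1, hup _ c2, hxlt, hylt, ?_⟩
        rw [← hg, abs_of_neg (by omega : q.2 - y1 < (0:Int)),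
            abs_of_neg (by omega : q.1 - x1 < (0:Int))]; ring
      · -- q.1 < x1, y1 < q.2 : q upper-left, current point lower-right
        refine ⟨q.1, y1, x1, q.2, hup _ c1, hup _ c2, hqc ▸ hup _ hqc, hself, hxlt, hylt, ?_⟩
        rw [← hg, abs_of_pos (by omega : (0:Int) < q.2 - y1),
            abs_of_neg (by omega : q.1 - x1 < (0:Int))]; ring
      · -- x1 < q.1, q.2 < y1 : current point upper-left, q lower-right
        refine ⟨x1, q.2, q.1, y1, hup _ c2, hup _ c1, hself, hqc ▸ hup _ hqc, hxlt, hylt, ?_⟩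
        rw [← hg, abs_of_neg (by omega : q.2 - y1 < (0:Int)),
            abs_of_pos (by omega : (0:Int) < q.1 - x1)]; ring
      · -- x1 < q.1, y1 < q.2 : current point lower-left, q upper-right
        refine ⟨x1, y1, q.1, q.2, hself, hup _ hqc, hup _ c2, hup _ c1, hxlt, hylt, ?_⟩
        rw [← hg, abs_of_pos (by omega : (0:Int) < q.2 - y1),
            abs_of_pos (by omega : (0:Int) < q.1 - x1)]; ring

-- one A step turns "min over rectangles in the key set" into the same with the new key
lemma stepA_min (st : Option Int × PySem.Dict (Int × Int) (Int × Int)) (x1 y1 : Int)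
    (h : IsMinOf st.1 (Rect (fun q => st.2.contains q = true))) :
    IsMinOf (stepA st [x1, y1]).1
      (Rect (fun q => (st.2.insert (x1, y1) (x1, y1)).contains q = true)) := by
  have hinner := innerA_min st.2.keys (st2c st.2 y1 x1) (fun q => |q.2 - y1| * |q.1 - x1|)
    st.1 _ h
  refine IsMinOf_congr (fun a => ?_) hinner
  rw [rect_insert_iff]

lemma foldA_inv (l : List (List Int)) :
    ∀ (st : Option Int × PySem.Dict (Int × Int) (Int × Int)),
    (∀ p ∈ l, p.length = 2) →
    IsMinOf st.1 (Rect (fun q => st.2.contains q = true)) →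
    IsMinOf (l.foldl stepA st).1 (Rect (fun q => (l.foldl stepA st).2.contains q = true)) ∧
    (∀ q, (l.foldl stepA st).2.contains q = true ↔ st.2.contains q = true ∨ q ∈ l.map toPair) := by
  induction l with
  | nil =>
    intro st _ h
    exact ⟨h, fun q => by simp⟩
  | cons p l ih =>
    intro st hpre h
    have hp2 : p.length = 2 := hpre p List.mem_cons_self
    match p, hp2 with
    | [x, y], _ =>
      simp only [List.foldl_cons]
      have hst' : stepA st [x, y] =
          ((stepA st [x, y]).1, st.2.insert (x, y) (x, y)) := rfl
      have hmin' : IsMinOf (stepA st [x, y]).1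
          (Rect (fun q => (stepA st [x, y]).2.contains q = true)) := by
        rw [hst']
        exact stepA_min st x y h
      obtain ⟨h1, h2⟩ := ih (stepA st [x, y])
        (fun p hp => hpre p (List.mem_cons_of_mem _ hp)) hmin'
      refine ⟨h1, fun q => ?_⟩
      rw [h2 q, hst']
      simp only [PySem.Dict.contains_insert, Bool.or_eq_true, beq_iff_eq,
        List.map_cons, List.mem_cons, toPair]
      tauto

-- ======== B side ========

def hasPairAt (pl : List (Int × Int)) (z : Int) (pr : Int × Int) : Prop :=
  (z, pr.1) ∈ pl ∧ (z, pr.2) ∈ pl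

-- 'last[(y1,y2)] = x'' means: x' is the largest processed column containing both ys
def MaxP (pl : List (Int × Int)) (done : List Int) (pr : Int × Int) (x' : Int) : Prop :=
  pr.1 < pr.2 ∧ x' ∈ done ∧ hasPairAt pl x' pr ∧
    ∀ z ∈ done, hasPairAt pl z pr → z ≤ x'

def SDP (pl : List (Int × Int)) (done : List Int) (q : Int × Int) : Prop :=
  q ∈ pl ∧ q.1 ∈ done

lemma pairsB_mem {ys : List Int} (hs : ys.Pairwise (· < ·)) (y1 y2 : Int) :
    (y1, y2) ∈ pairsB ys ↔ y1 ∈ ys ∧ y2 ∈ ys ∧ y1 < y2 := by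
  induction ys with
  | nil => simp [pairsB]
  | cons h t ih =>
    have hlt : ∀ y ∈ t, h < y := fun y hy => (List.pairwise_cons.mp hs).1 y hy
    have hst : t.Pairwise (· < ·) := (List.pairwise_cons.mp hs).2
    simp only [pairsB, List.mem_append, List.mem_map, List.mem_cons, ih hst]
    constructor
    · rintro (⟨y, hy, heq⟩ | ⟨h1, h2, h3⟩)
      · obtain ⟨rfl, rfl⟩ := Prod.mk.inj heq
        exact ⟨Or.inl rfl, Or.inr hy, hlt _ hy⟩
      · exact ⟨Or.inr h1, Or.inr h2, h3⟩
    · rintro ⟨(rfl | h1), (rfl | h2), h3⟩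
      · omega
      · exact Or.inl ⟨y2, h2, rfl⟩
      · exact absurd (hlt _ h1) (by omega)
      · exact Or.inr ⟨h1, h2, h3⟩

lemma pairsB_fst_mem {ys : List Int} : ∀ pr ∈ pairsB ys, pr.1 ∈ ys := by
  induction ys with
  | nil => simp [pairsB]
  | cons h t ih =>
    intro pr hpr
    simp only [pairsB, List.mem_append, List.mem_map] at hpr
    rcases hpr with ⟨y, _, rfl⟩ | hpr
    · exact List.mem_cons_self
    · exact List.mem_cons_of_mem _ (ih pr hpr)

lemma pairsB_nodup {ys : List Int} (hs : ys.Pairwise (· < ·)) : (pairsB ys).Nodup := by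
  induction ys with
  | nil => simp [pairsB]
  | cons h t ih =>
    have hlt : ∀ y ∈ t, h < y := fun y hy => (List.pairwise_cons.mp hs).1 y hy
    have hst : t.Pairwise (· < ·) := (List.pairwise_cons.mp hs).2
    have hndt : t.Nodup := hst.imp (fun hab => by omega)
    simp only [pairsB]
    refine List.Nodup.append ?_ (ih hst) ?_
    · exact hndt.map (fun a b hab => by exact (Prod.mk.inj hab).2)
    · intro pr hpr1 hpr2
      simp only [List.mem_map] at hpr1
      obtain ⟨y, hy, rfl⟩ := hpr1
      have := pairsB_fst_mem _ hpr2
      simp only at this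
      exact absurd (hlt _ this) (by omega)

lemma exists_max_mem {l : List Int} {P : Int → Prop} {x : Int}
    (hx : x ∈ l) (hP : P x) : ∃ m, m ∈ l ∧ P m ∧ ∀ z ∈ l, P z → z ≤ m := by
  classical
  suffices h : ∀ l' : List Int, (∃ y ∈ l', P y) → ∃ m, m ∈ l' ∧ P m ∧ ∀ z ∈ l', P z → z ≤ m by
    exact h l ⟨x, hx, hP⟩
  intro l'
  induction l' with
  | nil => rintro ⟨y, hy, _⟩; cases hy
  | cons a t ih =>
    rintro ⟨y, hy, hPy⟩
    by_cases hex : ∃ y ∈ t, P y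
    · obtain ⟨m, hm, hPm, hmax⟩ := ih hex
      by_cases ham : (¬ P a) ∨ a ≤ m
      · refine ⟨m, List.mem_cons_of_mem _ hm, hPm, ?_⟩
        intro z hz0 hPz
        rcases List.mem_cons.mp hz0 with rfl | hz
        · rcases ham with h | h
          · exact absurd hPz h
          · exact h
        · exact hmax z hz hPz
      · obtain ⟨h1, h2⟩ := not_or.mp ham
        refine ⟨a, List.mem_cons_self, not_not.mp h1, ?_⟩
        intro z hz0 hPz
        rcases List.mem_cons.mp hz0 with rfl | hz
        · exact le_refl z
        · exact le_trans (hmax z hz hPz) (by omega)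
    · have hPa : P a := by
        rcases List.mem_cons.mp hy with rfl | hy'
        · exact hPy
        · exact absurd ⟨y, hy', hPy⟩ hex
      refine ⟨a, List.mem_cons_self, hPa, ?_⟩
      intro z hz0 hPz
      rcases List.mem_cons.mp hz0 with rfl | hz
      · exact le_refl z
      · exact absurd ⟨z, hz, hPz⟩ hex

def colsStep (d : PySem.Dict Int (PySem.Set Int)) (p : List Int) :
    PySem.Dict Int (PySem.Set Int) :=
  match p with
  | x :: y :: _ => d.insert x (PySem.Set.add (d.getD x PySem.Set.empty) y)
  | _ => d

lemma colsB_aux (l : List (List Int)) :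
    ∀ (d : PySem.Dict Int (PySem.Set Int)),
    (∀ p ∈ l, p.length = 2) →
    d.keys.Nodup →
    (∀ x : Int, (d.getD x PySem.Set.empty).Nodup) →
    (∀ x : Int, d.contains x = false → d.getD x PySem.Set.empty = []) →
    (l.foldl colsStep d).keys.Nodup ∧
    (∀ x : Int, ((l.foldl colsStep d).getD x PySem.Set.empty).Nodup) ∧
    (∀ x y : Int, y ∈ (l.foldl colsStep d).getD x PySem.Set.empty ↔
      y ∈ d.getD x PySem.Set.empty ∨ (x, y) ∈ l.map toPair) ∧
    (∀ x : Int, (l.foldl colsStep d).contains x = true ↔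
      d.contains x = true ∨ x ∈ (l.map toPair).map Prod.fst) ∧
    (∀ x : Int, (l.foldl colsStep d).contains x = false →
      (l.foldl colsStep d).getD x PySem.Set.empty = []) := by
  induction l with
  | nil =>
    intro d _ h1 h2 h3
    exact ⟨h1, h2, fun x y => by simp, fun x => by simp, h3⟩
  | cons p l ih =>
    intro d hpre h1 h2 h3
    have hp2 : p.length = 2 := hpre p List.mem_cons_self
    match p, hp2 with
    | [x, y], _ =>
      simp only [List.foldl_cons]
      have hstep : colsStep d [x, y] = d.insert x (PySem.Set.add (d.getD x PySem.Set.empty) y) := rfl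
      rw [hstep]
      set d' := d.insert x (PySem.Set.add (d.getD x PySem.Set.empty) y) with hd'
      have hgetD' : ∀ x' : Int, d'.getD x' PySem.Set.empty =
          if x' = x then PySem.Set.add (d.getD x PySem.Set.empty) y
          else d.getD x' PySem.Set.empty := by
        intro x'; rw [hd', PySem.Dict.getD_insert]
      have hcont' : ∀ x' : Int, d'.contains x' = (x' == x || d.contains x') := by
        intro x'; rw [hd', PySem.Dict.contains_insert]
      obtain ⟨g1, g2, g3, g4, g5⟩ := ih d'
        (fun p hp => hpre p (List.mem_cons_of_mem _ hp))
        (PySem.Dict.nodup_keys_insert _ _ _ h1)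
        (by
          intro x'
          rw [hgetD' x']
          split_ifs with hx
          · exact PySem.Set.nodup_add _ _ (h2 x)
          · exact h2 x')
        (by
          intro x' hc
          rw [hcont' x'] at hc
          simp only [Bool.or_eq_false_iff, beq_eq_false_iff_ne, ne_eq] at hc
          rw [hgetD' x', if_neg hc.1]
          exact h3 x' hc.2)
      refine ⟨g1, g2, fun x' y' => ?_, fun x' => ?_, g5⟩
      · rw [g3 x' y', hgetD' x']
        simp only [List.map_cons, List.mem_cons, toPair, Prod.mk.injEq]
        split_ifs with hx
        · subst hx
          rw [PySem.Set.mem_add]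
          simp only [true_and]
          tauto
        · tauto
      · rw [g4 x', hcont' x']
        simp only [Bool.or_eq_true, beq_iff_eq, List.map_cons, List.mem_cons, toPair]
        tauto

-- cols characterisation
lemma colsB_inv (points : List (List Int)) (hpre : ∀ p ∈ points, p.length = 2) :
    (colsB points).keys.Nodup ∧
    (∀ x : Int, ((colsB points).getD x PySem.Set.empty).Nodup) ∧
    (∀ x y : Int, y ∈ (colsB points).getD x PySem.Set.empty ↔ (x, y) ∈ points.map toPair) ∧
    (∀ x : Int, (colsB points).contains x = true ↔ x ∈ (points.map toPair).map Prod.fst) := by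
  have hfold : colsB points = points.foldl colsStep PySem.Dict.empty := rfl
  obtain ⟨g1, g2, g3, g4, _⟩ := colsB_aux points PySem.Dict.empty hpre
    (by simp) (by intro x; simp [PySem.Dict.getD_empty])
    (by intro x _; simp [PySem.Dict.getD_empty])
  rw [hfold]
  refine ⟨g1, g2, fun x y => ?_, fun x => ?_⟩
  · rw [g3 x y]
    simp [PySem.Dict.getD_empty]
  · rw [g4 x]
    simp [PySem.Dict.contains_empty]

-- B's inner loop over the y-pairs of one column
lemma innerB (pl : List (Int × Int)) (done : List Int) (x : Int) :
    ∀ (PL : List (Int × Int)) (st : Option Int × PySem.Dict (Int × Int) Int)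
      (Q : Int → Prop),
    PL.Nodup →
    (∀ pr ∈ PL, pr.1 < pr.2 ∧ hasPairAt pl x pr) →
    (∀ pr ∈ PL, ∀ x', st.2.get? pr = some x' ↔ MaxP pl done pr x') →
    IsMinOf st.1 Q →
    IsMinOf (PL.foldl (stepInB x) st).1
      (fun a => Q a ∨ ∃ pr ∈ PL, ∃ x', MaxP pl done pr x' ∧ a = (x - x') * (pr.2 - pr.1)) ∧
    (∀ pr, (PL.foldl (stepInB x) st).2.get? pr =
      if pr ∈ PL then some x else st.2.get? pr) := by
  intro PL
  induction PL with
  | nil =>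
    intro st Q _ _ _ hmin
    refine ⟨IsMinOf_congr (fun a => by simp) hmin, fun pr => by simp⟩
  | cons pr PL ih =>
    intro st Q hnd hval hget hmin
    simp only [List.foldl_cons]
    have hprPL : pr ∉ PL := (List.nodup_cons.mp hnd).1
    -- the state after the first pair
    have hsnd : (stepInB x st pr).2 = st.2.insert pr x := rfl
    have hmin1 : IsMinOf (stepInB x st pr).1
        (fun b => Q b ∨ ∃ x', MaxP pl done pr x' ∧ b = (x - x') * (pr.2 - pr.1)) := by
      have hiff := hget pr List.mem_cons_self
      cases hg : st.2.get? pr with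
      | none =>
        have : (stepInB x st pr).1 = st.1 := by
          simp only [stepInB, hg]
        rw [this]
        refine IsMinOf_congr (fun b => ?_) hmin
        constructor
        · exact fun hb => Or.inl hb
        · rintro (hb | ⟨x', hmax, _⟩)
          · exact hb
          · exact absurd ((hiff x').mpr hmax) (by rw [hg]; simp)
      | some xp =>
        have : (stepInB x st pr).1 = updMinB st.1 ((x - xp) * (pr.2 - pr.1)) := by
          simp only [stepInB, hg]
        rw [this]
        have hmaxp : MaxP pl done pr xp := (hiff xp).mp hg
        refine IsMinOf_congr (fun b => ?_) (updMinB_min hmin ((x - xp) * (pr.2 - pr.1)))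
        constructor
        · rintro (hb | hb)
          · exact Or.inl hb
          · exact Or.inr ⟨xp, hmaxp, hb⟩
        · rintro (hb | ⟨x', hmax', hb⟩)
          · exact Or.inl hb
          · have hxx : x' = xp :=
              le_antisymm (hmaxp.2.2.2 x' hmax'.2.1 hmax'.2.2.1)
                (hmax'.2.2.2 xp hmaxp.2.1 hmaxp.2.2.1)
            exact Or.inr (by rw [← hxx]; exact hb)
    have hget1 : ∀ pr' ∈ PL, ∀ x', (stepInB x st pr).2.get? pr' = some x' ↔
        MaxP pl done pr' x' := by
      intro pr' hpr' x'
      rw [hsnd, PySem.Dict.get?_insert_of_ne _ _ (by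
        intro hcon; exact hprPL (hcon ▸ hpr'))]
      exact hget pr' (List.mem_cons_of_mem _ hpr') x'
    obtain ⟨r1, r2⟩ := ih (stepInB x st pr) _
      (List.nodup_cons.mp hnd).2
      (fun pr' hpr' => hval pr' (List.mem_cons_of_mem _ hpr'))
      hget1 hmin1
    constructor
    · refine IsMinOf_congr (fun a => ?_) r1
      simp only [List.mem_cons]
      constructor
      · rintro ((ha | ⟨x', hm, hb⟩) | ⟨pr', hpr', x', hm, hb⟩)
        · exact Or.inl ha
        · exact Or.inr ⟨pr, Or.inl rfl, x', hm, hb⟩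
        · exact Or.inr ⟨pr', Or.inr hpr', x', hm, hb⟩
      · rintro (ha | ⟨pr', (rfl | hpr'), x', hm, hb⟩)
        · exact Or.inl (Or.inl ha)
        · exact Or.inl (Or.inr ⟨x', hm, hb⟩)
        · exact Or.inr ⟨pr', hpr', x', hm, hb⟩
    · intro pr''
      rw [r2 pr'', hsnd]
      by_cases hmem : pr'' ∈ PL
      · rw [if_pos hmem, if_pos (List.mem_cons_of_mem _ hmem)]
      · rw [if_neg hmem]
        by_cases heq : pr'' = pr
        · subst heq
          rw [PySem.Dict.get?_insert_self, if_pos List.mem_cons_self]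
        · rw [PySem.Dict.get?_insert_of_ne _ _ heq,
            if_neg (by simp [List.mem_cons, heq, hmem])]

lemma outerB (pl : List (Int × Int)) (cols : PySem.Dict Int (PySem.Set Int))
    (hnodupcol : ∀ x : Int, (cols.getD x PySem.Set.empty).Nodup)
    (hcolmem : ∀ x y : Int, y ∈ cols.getD x PySem.Set.empty ↔ (x, y) ∈ pl) :
    ∀ (xs done : List Int) (st : Option Int × PySem.Dict (Int × Int) Int),
    xs.Pairwise (· < ·) →
    (∀ z ∈ done, ∀ x ∈ xs, z < x) →
    IsMinOf st.1 (Rect (SDP pl done)) →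
    (∀ (pr : Int × Int) (x' : Int), st.2.get? pr = some x' ↔ MaxP pl done pr x') →
    IsMinOf ((xs.foldl (stepOutB cols) st).1) (Rect (SDP pl (done ++ xs))) := by
  intro xs
  induction xs with
  | nil =>
    intro done st _ _ hmin _
    simpa using hmin
  | cons x xs ih =>
    intro done st hsort hdone hmin hget
    simp only [List.foldl_cons]
    have hxxs : ∀ x'' ∈ xs, x < x'' := fun x'' h => (List.pairwise_cons.mp hsort).1 x'' h
    have hsxs : xs.Pairwise (· < ·) := (List.pairwise_cons.mp hsort).2
    have hdx : ∀ z ∈ done, z < x := fun z hz => hdone z hz x List.mem_cons_self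
    set ys := PySem.List.sorted (cols.getD x PySem.Set.empty) (fun y => y) false with hys
    have hysnd : ys.Nodup := ((PySem.List.sorted_perm _ _ _).nodup_iff).mpr (hnodupcol x)
    have hyslt : ys.Pairwise (· < ·) := by
      have h1 := PySem.List.sorted_pairwise (cols.getD x PySem.Set.empty) (fun y => y)
      exact (h1.and hysnd).imp (fun h => lt_of_le_of_ne h.1 h.2)
    have hysmem : ∀ y : Int, y ∈ ys ↔ (x, y) ∈ pl := by
      intro y
      rw [hys, PySem.List.mem_sorted]
      exact hcolmem x y
    have hPLmem : ∀ pr : Int × Int, pr ∈ pairsB ys ↔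
        ((x, pr.1) ∈ pl ∧ (x, pr.2) ∈ pl ∧ pr.1 < pr.2) := by
      intro pr
      have := pairsB_mem hyslt pr.1 pr.2
      rw [← hysmem pr.1, ← hysmem pr.2]
      simpa using this
    have hstep : stepOutB cols st x = (pairsB ys).foldl (stepInB x) st := rfl
    rw [hstep]
    obtain ⟨r1, r2⟩ := innerB pl done x (pairsB ys) st (Rect (SDP pl done))
      (pairsB_nodup hyslt)
      (fun pr hpr => by
        obtain ⟨h1, h2, h3⟩ := (hPLmem pr).mp hpr
        exact ⟨h3, h1, h2⟩)
      (fun pr _ x' => hget pr x')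
      hmin
    -- transfer the minimum to the enlarged column set
    have hmin' : IsMinOf (((pairsB ys).foldl (stepInB x) st).1)
        (Rect (SDP pl (done ++ [x]))) := by
      refine IsMinOf_between r1 ?_ ?_
      · rintro a (ha | ⟨pr, hpr, x', hmax, rfl⟩)
        · exact rect_mono (fun q hq => ⟨hq.1, List.mem_append_left _ hq.2⟩) ha
        · obtain ⟨hpx1, hpx2, hplt⟩ := (hPLmem pr).mp hpr
          obtain ⟨hprlt, hx'd, ⟨hp1, hp2⟩, _⟩ := hmax
          exact ⟨x', pr.1, x, pr.2, ⟨hp1, List.mem_append_left _ hx'd⟩,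
            ⟨hpx2, List.mem_append_right _ List.mem_cons_self⟩,
            ⟨hp2, List.mem_append_left _ hx'd⟩,
            ⟨hpx1, List.mem_append_right _ List.mem_cons_self⟩,
            hdx x' hx'd, hplt, rfl⟩
      · rintro a ⟨X1, Y1, X2, Y2, ⟨m1, d1⟩, ⟨m2, d2⟩, ⟨m3, d3⟩, ⟨m4, d4⟩, hx12, hy12, rfl⟩
        have hmem : ∀ {z : Int}, z ∈ done ++ [x] → z = x ∨ z ∈ done := by
          intro z hz
          rcases List.mem_append.mp hz with h | h
          · exact Or.inr h
          · exact Or.inl (by simpa using h)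
        rcases hmem d2 with hX2 | hX2
        · -- right edge at the new column x
          subst hX2
          have hX1 : X1 ∈ done := by
            rcases hmem d1 with h | h
            · omega
            · exact h
          obtain ⟨x0, hx0d, hx0p, hx0max⟩ :=
            exists_max_mem (P := fun z => hasPairAt pl z (Y1, Y2)) hX1 ⟨m1, m3⟩
          refine ⟨(X2 - x0) * (Y2 - Y1), Or.inr ⟨(Y1, Y2), ?_, x0, ?_, rfl⟩, ?_⟩
          · exact (hPLmem (Y1, Y2)).mpr ⟨m4, m2, hy12⟩
          · exact ⟨hy12, hx0d, hx0p, hx0max⟩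
          · have h1 : X1 ≤ x0 := hx0max X1 hX1 ⟨m1, m3⟩
            have h2 : (0:Int) < Y2 - Y1 := by omega
            nlinarith
        · -- the rectangle lies in the old columns
          have hX1 : X1 ∈ done := by
            rcases hmem d1 with h | h
            · have := hdx X2 hX2; omega
            · exact h
          exact ⟨(X2 - X1) * (Y2 - Y1),
            Or.inl ⟨X1, Y1, X2, Y2, ⟨m1, hX1⟩, ⟨m2, hX2⟩, ⟨m3, hX1⟩, ⟨m4, hX2⟩,
              hx12, hy12, rfl⟩, le_refl _⟩
    -- transfer the last-seen characterisation
    have hget' : ∀ (pr : Int × Int) (x' : Int),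
        (((pairsB ys).foldl (stepInB x) st).2).get? pr = some x' ↔
          MaxP pl (done ++ [x]) pr x' := by
      intro pr x'
      rw [r2 pr]
      by_cases hpr : pr ∈ pairsB ys
      · rw [if_pos hpr]
        obtain ⟨hpx1, hpx2, hplt⟩ := (hPLmem pr).mp hpr
        constructor
        · intro h
          have hx' : x' = x := by injection h with h; omega
          subst hx'
          refine ⟨hplt, List.mem_append_right _ List.mem_cons_self, ⟨hpx1, hpx2⟩, ?_⟩
          intro z hz _
          rcases List.mem_append.mp hz with h | h
          · exact le_of_lt (hdx z h)
          · simp at h; omega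
        · rintro ⟨_, hx'mem, _, hmaxx⟩
          have h1 : x ≤ x' := hmaxx x (List.mem_append_right _ List.mem_cons_self) ⟨hpx1, hpx2⟩
          have h2 : x' = x := by
            rcases List.mem_append.mp hx'mem with h | h
            · have := hdx x' h; omega
            · simpa using h
          rw [h2]
      · rw [if_neg hpr, hget pr x']
        have hnopair : ¬ (pr.1 < pr.2 ∧ hasPairAt pl x pr) := by
          intro ⟨h1, h2⟩
          exact hpr ((hPLmem pr).mpr ⟨h2.1, h2.2, h1⟩)
        constructor
        · rintro ⟨hlt, hx'd, hp, hmax⟩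
          refine ⟨hlt, List.mem_append_left _ hx'd, hp, ?_⟩
          intro z hz hpz
          rcases List.mem_append.mp hz with h | h
          · exact hmax z h hpz
          · simp only [List.mem_singleton] at h
            subst h
            exact absurd ⟨hlt, hpz⟩ hnopair
        · rintro ⟨hlt, hx'd, hp, hmax⟩
          have hx'done : x' ∈ done := by
            rcases List.mem_append.mp hx'd with h | h
            · exact h
            · simp only [List.mem_singleton] at h
              subst h
              exact absurd ⟨hlt, hp⟩ hnopair
          exact ⟨hlt, hx'done, hp, fun z hz hpz =>
            hmax z (List.mem_append_left _ hz) hpz⟩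
    have hfin := ih (done ++ [x]) ((pairsB ys).foldl (stepInB x) st)
      hsxs
      (by
        intro z hz x'' hx''
        rcases List.mem_append.mp hz with h | h
        · exact lt_trans (hdx z h) (hxxs x'' hx'')
        · simp only [List.mem_singleton] at h
          subst h
          exact hxxs x'' hx'')
      hmin' hget'
    simpa using hfin

-- ===== VERDICT (by name: the statement is the Claim_ definition above) =====
theorem minAreaRect_spec : Claim_equal_minAreaRect := by
  intro points _ hpre
  unfold Spec_minAreaRect
  by_cases hlen : points.length < 4
  · -- both programs return 0 before looking at the rows
    have hA : minAreaRect points = 0 := by unfold minAreaRect; rw [if_pos hlen]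
    have hB : minAreaRect_alt points = 0 := by unfold minAreaRect_alt; rw [if_pos hlen]
    rw [hA, hB]
  have hpre : ∀ p ∈ points, p.length = 2 := hpre.resolve_left hlen
  set pl := points.map toPair with hpl
  -- A computes the minimum over Rect (· ∈ pl)
  have hA0 : IsMinOf (none : Option Int)
      (Rect (fun q => (PySem.Dict.empty : PySem.Dict (Int × Int) (Int × Int)).contains q = true)) := by
    refine ⟨fun a ha => ?_, fun m hm => by cases hm⟩
    obtain ⟨x1, y1, x2, y2, h1, _⟩ := ha
    rw [PySem.Dict.contains_empty] at h1
    cases h1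
  obtain ⟨hminA, hkeysA⟩ := foldA_inv points ((none : Option Int), PySem.Dict.empty) hpre hA0
  have hminA' : IsMinOf ((points.foldl stepA ((none : Option Int), PySem.Dict.empty)).1)
      (Rect (· ∈ pl)) := by
    refine IsMinOf_congr (fun a => ?_) hminA
    constructor
    · exact fun h => rect_mono (fun q hq => by
        have := (hkeysA q).mp hq
        rcases this with h' | h'
        · rw [PySem.Dict.contains_empty] at h'; cases h'
        · exact h') h
    · exact fun h => rect_mono (fun q hq => (hkeysA q).mpr (Or.inr hq)) h
  -- B computes the same minimum
  obtain ⟨c1, c2, c3, c4⟩ := colsB_inv points hpre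
  set cols := colsB points with hcols
  set xs := PySem.List.sorted cols.keys (fun x => x) false with hxs
  have hxsnd : xs.Nodup := ((PySem.List.sorted_perm _ _ _).nodup_iff).mpr c1
  have hxslt : xs.Pairwise (· < ·) := by
    have h1 := PySem.List.sorted_pairwise cols.keys (fun x => x)
    exact (h1.and hxsnd).imp (fun h => lt_of_le_of_ne h.1 h.2)
  have hB0min : IsMinOf (none : Option Int) (Rect (SDP pl [])) := by
    refine ⟨fun a ha => ?_, fun m hm => by cases hm⟩
    obtain ⟨x1, y1, x2, y2, ⟨_, h1⟩, _⟩ := ha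
    cases h1
  have hB0get : ∀ (pr : Int × Int) (x' : Int),
      (PySem.Dict.empty : PySem.Dict (Int × Int) Int).get? pr = some x' ↔ MaxP pl [] pr x' := by
    intro pr x'
    rw [PySem.Dict.get?_empty]
    constructor
    · intro h; cases h
    · rintro ⟨_, h, _⟩; cases h
  have hminB := outerB pl cols c2 c3 xs [] ((none : Option Int), PySem.Dict.empty)
    hxslt (by intro z hz; cases hz) hB0min hB0get
  have hminB' : IsMinOf ((xs.foldl (stepOutB cols) ((none : Option Int), PySem.Dict.empty)).1)
      (Rect (· ∈ pl)) := by
    refine IsMinOf_congr (fun a => ?_) hminB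
    constructor
    · exact fun h => rect_mono (fun q hq => hq.1) h
    · refine fun h => rect_mono (fun q hq => ⟨hq, ?_⟩) h
      have : q.1 ∈ (points.map toPair).map Prod.fst := List.mem_map_of_mem hq
      have hc : cols.contains q.1 = true := (c4 q.1).mpr this
      have hk : q.1 ∈ cols.keys := (PySem.Dict.contains_iff_mem_keys _ _).mp hc
      show q.1 ∈ [] ++ xs
      rw [List.nil_append, hxs, PySem.List.mem_sorted]
      exact hk
  -- the two minima coincide
  have heq := IsMinOf_unique hminA' hminB'
  have hlenpl : pl.length = points.length := by rw [hpl, List.length_map]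
  have hAv : minAreaRect points =
      (if points.length < 4 then 0
       else match (points.foldl stepA ((none : Option Int), PySem.Dict.empty)).1 with
        | some m => m
        | none => 0) := rfl
  have hBv : minAreaRect_alt points =
      (if points.length < 4 then 0
       else match (xs.foldl (stepOutB cols) ((none : Option Int), PySem.Dict.empty)).1 with
        | some b => b
        | none => 0) := rfl
  rw [hAv, hBv, ← heq, if_neg hlen]
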